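-- pv_equiv track=rewrite | github.com/CQCL/cryptomite | extlib/utils.py | na_set
-- ===== SOURCE A (Python) =====
-- from typing import Tuple, List
-- from math import sqrt
--
-- def is_prime(n: int) -> bool:
--     """
--     Checks an integer for primality.
--
--     Parameters
--     ----------
--         n : int
--             integer to check for primality
--
--     Returns
--     -------
--         bool : Whether n is prime.
--     """
--
--     for i in range(2, round(sqrt(n)) + 1):
--         if n % i == 0:
--             return False
--     return True
--
-- def prime_facto(n: int) -> Tuple[List[int], List[int]]:
--     """
--     Defines the factors of the prime numbers used.
--     It is required for the later function: na_set.
--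
--     Parameters
--     ----------
--         n : int
--             number to check
--
--     Returns
--     -------
--         list :
--             Returns factors and powers.
--     """
--     factors = []
--     i = 2
--     while i <= round(sqrt(n)) + 1:
--         if n % i == 0:
--             factors.append(i)
--             n = n // i
--         else:
--             i = i + 1
--     if n != 1:
--         factors.append(n)
--     factors2 = [factors[0]]
--     powers = [1]
--     p = 0
--     # this will put 24 = 2 * 2 * 2 * 3 in the form
--     # factors=(2,3) and powers=(3,1) for (2^3) * (3^1)
--     for i in range(1, len(factors)):
--         if factors[i] == factors[i - 1]:
--             powers[p] = powers[p] + 1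
--         if factors[i] != factors[i - 1]:
--             # sz = sz + 1
--             powers.append(1)
--             p = p + 1
--             factors2.append(factors[i])
--
--     return factors2, powers
--
-- def na_set(k: int) -> int:
--     """
--     Ensure the number of runs falls within the correct set:
--     i.e. that we run enough times.
--
--     Parameters
--     ----------
--         k : int
--             number to check is in the set.
--
--     Returns
--     -------
--         int :
--             This number +1 is in na_set.
--     """
--
--     if k % 2 != 0:
--         k = k - 1
--     stop = False
--     while not stop:
--         stop = True
--         while not is_prime(k + 1):
--             k = k - 2
--         primes, _ = prime_facto(k)
--         for prime in primes:
--             if pow(2, k // prime, k + 1) == 1: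
--                 stop = False
--                 k = k - 2
--                 break
--     return k
-- ===== SOURCE B (Python) =====
-- def na_set(k: int) -> int:
--     if k % 2 != 0:
--         k = k - 1
--     while not _lucas_two(k):
--         k = k - 2
--     return k
--
--
-- def _lucas_two(k: int) -> bool:
--     # Lucas primality certificate with base 2: k+1 is prime AND 2 is a
--     # primitive root mod k+1  iff  2^k == 1 (mod k+1) and, for every
--     # prime q dividing k, 2^(k/q) != 1 (mod k+1).  One certificate check
--     # per candidate; no separate primality test of k+1 at all.
--     p = k + 1
--     if pow(2, k, p) != 1:
--         return False
--     n, q = k, 2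
--     while q * q <= n:
--         if n % q == 0:
--             if pow(2, k // q, p) == 1:
--                 return False
--             while n % q == 0:
--                 n = n // q
--         q = q + 1
--     return n == 1 or pow(2, k // n, p) != 1
-- ===== Notes on version B (the rewrite author's own statement) =====
-- stated objective: alternative
-- what changed: A finds the next candidate by a trial-division primality test of k+1 and then factors k and runs the pow tests; B never tests k+1 for primality at all: per candidate it checks a Lucas primality certificate with base 2 (pow(2,k,k+1)==1 plus pow(2,k//q,k+1)!=1 for every prime q|k), whose success simultaneously proves k+1 prime and 2 a primitive root.
import Mathlib
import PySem

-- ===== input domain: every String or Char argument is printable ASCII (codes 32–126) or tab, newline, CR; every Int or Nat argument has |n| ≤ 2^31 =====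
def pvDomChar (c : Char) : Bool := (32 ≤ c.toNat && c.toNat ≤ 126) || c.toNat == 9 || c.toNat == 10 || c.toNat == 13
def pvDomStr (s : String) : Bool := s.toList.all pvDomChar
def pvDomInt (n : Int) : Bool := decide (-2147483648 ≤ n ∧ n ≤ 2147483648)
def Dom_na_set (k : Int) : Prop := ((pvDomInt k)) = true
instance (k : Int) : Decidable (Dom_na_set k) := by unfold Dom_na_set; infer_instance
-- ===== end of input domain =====

-- B replaces A's two-phase search (trial-division primality test of k+1, then factor k and run
-- the pow tests) by a single Lucas primality certificate with base 2 per candidate, which never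
-- tests k+1 for primality; alternative algorithm, no speed claim.
-- Both ports compute over Nat after the initial parity adjustment: exact for k ≥ 2 (= Pre_);
-- for k < 2 the Python A raises (excluded by Pre_).

-- ===== PORT A =====

-- Python's round(sqrt(n)) for n : Nat: exact on the admitted domain (n ≤ 2^31 + 3), where
-- IEEE float sqrt is correctly rounded and √n is never exactly halfway between two integers.
def pyRoundSqrt (n : Nat) : Nat :=
  if Nat.sqrt n * Nat.sqrt n + Nat.sqrt n < n then Nat.sqrt n + 1 else Nat.sqrt n

-- is_prime: the for-loop over range(2, round(sqrt(n))+1) with early `return False` = List.all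
def isPrimeA (n : Nat) : Bool :=
  (List.range' 2 (pyRoundSqrt n + 1 - 2)).all (fun i => n % i != 0)

-- prime_facto's first while loop; the `2 ≤ i ∧ 0 < n` parts of the guard only make it total
-- (Python diverges at n = 0, unreachable under Pre_)
-- cited by factoLoop's decreasing_by
theorem pv_sub_succ_lt (a i : Nat) (h : i ≤ a + 1) : a + 2 - (i + 1) < a + 2 - i := by omega

def factoLoop (n i : Nat) (acc : List Nat) : Nat × List Nat :=
  if h : 2 ≤ i ∧ i ≤ pyRoundSqrt n + 1 ∧ 0 < n then
    if n % i = 0 then factoLoop (n / i) i (acc ++ [i])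
    else factoLoop n (i + 1) acc
  else (n, acc)
termination_by (n, pyRoundSqrt n + 2 - i)
decreasing_by
  · exact Prod.Lex.left _ _ (Nat.div_lt_self h.2.2 h.1)
  · exact Prod.Lex.right _ (pv_sub_succ_lt _ _ h.2.1)

-- prime_facto's compression pass: factors2 / powers built group by group
-- (powers[p] += 1 on a repeated factor, append on a new one)
def compress (prev cnt : Nat) : List Nat → List Nat × List Nat
  | [] => ([], [cnt])
  | x :: xs =>
    if x = prev then compress prev (cnt + 1) xs
    else
      let r := compress x 1 xs
      (x :: r.1, cnt :: r.2)

def primeFactoA (n : Nat) : List Nat × List Nat :=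
  let r := factoLoop n 2 []
  let factors := if r.1 ≠ 1 then r.2 ++ [r.1] else r.2
  match factors with
  | [] => ([], [])   -- Python raises IndexError here (factors empty), unreachable under Pre_
  | f0 :: rest =>
    let c := compress f0 1 rest
    (f0 :: c.1, c.2)

-- the `for prime in primes: if pow(2, k // prime, k + 1) == 1: …; break` test
def testA (k : Nat) : Bool :=
  ((primeFactoA k).1).any (fun p => PySem.Int.powMod 2 (k / p) ((k : Int) + 1) == 1)

-- cited by outerA's decreasing_by
theorem testA_zero : testA 0 = false := by
  unfold testA primeFactoA
  rw [factoLoop]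
  decide

-- cited by innerA's decreasing_by
theorem innerA_dec (k : Nat) (h : ¬ isPrimeA (k + 1) = true) : k - 2 < k := by
  have : k ≠ 0 := by rintro rfl; exact h (by decide)
  omega

-- inner `while not is_prime(k + 1): k = k - 2`
def innerA (k : Nat) : Nat :=
  if h : isPrimeA (k + 1) then k else innerA (k - 2)
termination_by k
decreasing_by exact innerA_dec k h

-- cited by outerA's decreasing_by
theorem innerA_le (k : Nat) : innerA k ≤ k := by
  fun_induction innerA with
  | case1 k h => exact Nat.le_refl k
  | case2 k h ih => omega

-- cited by outerA's decreasing_by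
theorem outerA_dec (k : Nat) (h : testA (innerA k) = true) : innerA k - 2 < k := by
  have hle : innerA k ≤ k := innerA_le k
  have hne : innerA k ≠ 0 := by
    intro e
    rw [e, testA_zero] at h
    exact Bool.noConfusion h
  omega

-- the outer `while not stop` loop
def outerA (k : Nat) : Nat :=
  let k' := innerA k
  if h : testA k' then outerA (k' - 2) else k'
termination_by k
decreasing_by exact outerA_dec k h

def na_set (k : Int) : Int :=
  let k0 := if PySem.Int.mod k 2 ≠ 0 then k - 1 else k
  ((outerA k0.toNat : Nat) : Int)

-- ===== PORT B =====

-- `while n % q == 0: n = n // q`; the `2 ≤ q ∧ 0 < n` guard only makes it total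
def stripFac (n q : Nat) : Nat :=
  if h : 2 ≤ q ∧ 0 < n ∧ n % q = 0 then stripFac (n / q) q else n
termination_by n
decreasing_by exact Nat.div_lt_self h.2.1 h.1

-- cited by lucasFacLoop's decreasing_by
theorem stripFac_le (n q : Nat) : stripFac n q ≤ n := by
  fun_induction stripFac with
  | case1 n h ih => exact le_trans ih (Nat.div_le_self _ _)
  | case2 n h => exact Nat.le_refl n

-- cited by lucasFacLoop's decreasing_by
theorem stripFac_lt (n q : Nat) (h2 : 2 ≤ q) (h0 : 0 < n) (hd : n % q = 0) :
    stripFac n q < n := by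
  rw [stripFac]
  rw [dif_pos (⟨h2, h0, hd⟩ : 2 ≤ q ∧ 0 < n ∧ n % q = 0)]
  exact lt_of_le_of_lt (stripFac_le _ _) (Nat.div_lt_self h0 (by omega))

-- cited by lucasFacLoop's decreasing_by
theorem lucasFacLoop_dec1 (n q : Nat) (h : 2 ≤ q ∧ q * q ≤ n) (hd : n % q = 0) :
    stripFac n q < n := by
  have h0 : 0 < n := by nlinarith [h.1, h.2]
  exact stripFac_lt n q h.1 h0 hd

-- cited by lucasFacLoop's decreasing_by
theorem lucasFacLoop_dec2 (n q : Nat) (h : 2 ≤ q ∧ q * q ≤ n) : n - (q + 1) < n - q := by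
  have : q < n := by nlinarith [h.1, h.2]
  omega

-- _lucas_two's trial-division pass over the prime divisors of k (after the Fermat check)
def lucasFacLoop (k n q : Nat) : Bool :=
  if h : 2 ≤ q ∧ q * q ≤ n then
    if hd : n % q = 0 then
      if PySem.Int.powMod 2 (k / q) ((k : Int) + 1) == 1 then false
      else lucasFacLoop k (stripFac n q) (q + 1)
    else lucasFacLoop k n (q + 1)
  else (n == 1) || !(PySem.Int.powMod 2 (k / n) ((k : Int) + 1) == 1)
termination_by (n, n - q)
decreasing_by
  · exact Prod.Lex.left _ _ (lucasFacLoop_dec1 n q h hd)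
  · exact Prod.Lex.right _ (lucasFacLoop_dec2 n q h)

-- _lucas_two: the early `return False` on pow(2, k, k+1) != 1, then the factoring pass
def lucasTwo (k : Nat) : Bool :=
  if PySem.Int.powMod 2 k ((k : Int) + 1) == 1 then lucasFacLoop k k 2 else false

-- `while not _lucas_two(k): k = k - 2`; the `2 ≤ k` guard only makes it total
-- (Python diverges below 2, unreachable under Pre_)
def outerB (k : Nat) : Nat :=
  if lucasTwo k then k
  else if h : 2 ≤ k then outerB (k - 2) else k
termination_by k
decreasing_by omega

def na_set_alt (k : Int) : Int :=
  let k0 := if PySem.Int.mod k 2 ≠ 0 then k - 1 else k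
  ((outerB k0.toNat : Nat) : Int)

-- ===== PRECONDITION & SPEC =====
-- Python's na_set raises for every k < 2 (a ValueError from sqrt of a negative number,
-- or a ZeroDivisionError when the parity-adjusted k reaches zero); it returns normally
-- exactly for k ≥ 2, so Pre_ excludes no input on which A returns.
def Pre_na_set (k : Int) : Prop := 2 ≤ k
instance (k : Int) : Decidable (Pre_na_set k) := by unfold Pre_na_set; infer_instance

def pvWitness_na_set : Int := 2

def Spec_na_set (k : Int) (out : Int) : Prop := out = na_set_alt k
instance (k : Int) (out : Int) : Decidable (Spec_na_set k out) := by unfold Spec_na_set; infer_instance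

-- ===== CLAIM (what is proved, stated in full; the proofs are below) =====
def Claim_equal_na_set : Prop := ∀ (k : Int), Dom_na_set k → Pre_na_set k → Spec_na_set k (na_set k)

-- ===== LEMMAS AND PROOFS =====

-- ---- generic facts about the trial-division bound ----

theorem pyRoundSqrt_ge (n : Nat) : Nat.sqrt n ≤ pyRoundSqrt n := by
  unfold pyRoundSqrt; split <;> omega

-- in the round-up case, round(sqrt(n)) = sqrt(n)+1 never divides n
theorem not_dvd_roundup (n : Nat) (h : Nat.sqrt n * Nat.sqrt n + Nat.sqrt n < n) :
    ¬ (Nat.sqrt n + 1) ∣ n := by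
  rintro ⟨c, hc⟩
  have h2 : n < (Nat.sqrt n + 1) * (Nat.sqrt n + 1) := by
    have := Nat.lt_succ_sqrt' n; nlinarith [this]
  set s := Nat.sqrt n
  have hcgt : s < c := by nlinarith
  have hclt : c < s + 1 := by nlinarith
  omega

-- A's is_prime is a correct primality test on n ≥ 2
theorem isPrimeA_iff (n : Nat) (h2 : 2 ≤ n) : isPrimeA n = true ↔ Nat.Prime n := by
  unfold isPrimeA
  rw [List.all_eq_true]
  have hmem : ∀ i : Nat, i ∈ List.range' 2 (pyRoundSqrt n + 1 - 2) ↔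
      2 ≤ i ∧ i < pyRoundSqrt n + 1 := by
    intro i
    rw [List.mem_range'_1]
    have hr1 : 1 ≤ pyRoundSqrt n := le_trans (by
      have : 1 ≤ Nat.sqrt n := by
        by_contra hs0
        have hz : Nat.sqrt n = 0 := by omega
        have := Nat.sqrt_eq_zero.mp hz
        omega
      exact this) (pyRoundSqrt_ge n)
    omega
  constructor
  · intro hall
    rw [Nat.prime_def_le_sqrt]
    refine ⟨h2, fun m hm hms hdvd => ?_⟩
    have hmr : m ∈ List.range' 2 (pyRoundSqrt n + 1 - 2) := by
      rw [hmem]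
      exact ⟨hm, by have := pyRoundSqrt_ge n; omega⟩
    have := hall m hmr
    simp only [bne_iff_ne, ne_eq] at this
    exact this (Nat.eq_zero_of_dvd_of_lt hdvd |> fun _ => Nat.mod_eq_zero_of_dvd hdvd)
  · intro hp i hi
    rw [hmem] at hi
    simp only [bne_iff_ne, ne_eq]
    intro hmod
    have hdvd : i ∣ n := Nat.dvd_of_mod_eq_zero hmod
    by_cases hsq : i ≤ Nat.sqrt n
    · exact (Nat.prime_def_le_sqrt.mp hp).2 i hi.1 hsq hdvd
    · -- i = sqrt n + 1 in the round-up case: never a divisor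
      have hup : Nat.sqrt n * Nat.sqrt n + Nat.sqrt n < n := by
        unfold pyRoundSqrt at hi
        by_contra hnot
        rw [if_neg hnot] at hi
        omega
      have : i = Nat.sqrt n + 1 := by
        unfold pyRoundSqrt at hi
        rw [if_pos hup] at hi
        omega
      exact not_dvd_roundup n hup (this ▸ hdvd)

-- ---- A's factorisation and test characterised (as in the source: distinct prime factors) ----

theorem prime_of_min_dvd (n q : Nat) (h2 : 2 ≤ q) (hq : q ∣ n)
    (hno : ∀ d, 2 ≤ d → d < q → ¬ d ∣ n) : Nat.Prime q := by
  rw [Nat.prime_def_lt]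
  refine ⟨h2, fun m hm hmq => ?_⟩
  by_contra h1
  have hm2 : 2 ≤ m := by
    rcases Nat.eq_zero_or_pos m with rfl | hp1
    · have := Nat.eq_zero_of_zero_dvd hmq; omega
    · omega
  exact hno m hm2 hm (hmq.trans hq)

theorem factoLoop_spec (n i : Nat) (acc : List Nat) :
    0 < n → 2 ≤ i → (∀ d, 2 ≤ d → d < i → ¬ d ∣ n) → ∀ p : Nat,
      (p ∈ (if (factoLoop n i acc).1 ≠ 1 then (factoLoop n i acc).2 ++ [(factoLoop n i acc).1]
            else (factoLoop n i acc).2)) ↔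
        p ∈ acc ∨ (p.Prime ∧ p ∣ n) := by
  fun_induction factoLoop n i acc with
  | case1 n i acc h hd ih =>
    intro h0 h2 hno p
    have hidvd : i ∣ n := Nat.dvd_of_mod_eq_zero hd
    have hip : Nat.Prime i := prime_of_min_dvd n i h2 hidvd hno
    have h0' : 0 < n / i := Nat.div_pos (Nat.le_of_dvd h0 hidvd) (by omega)
    have hno' : ∀ d, 2 ≤ d → d < i → ¬ d ∣ n / i :=
      fun d hd2 hdi hdd => hno d hd2 hdi (hdd.trans (Nat.div_dvd_of_dvd hidvd))
    rw [ih h0' h2 hno' p]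
    have hn : i * (n / i) = n := Nat.mul_div_cancel' hidvd
    simp only [List.mem_append, List.mem_singleton]
    constructor
    · rintro ((hpacc | rfl) | ⟨pp, pd⟩)
      · exact Or.inl hpacc
      · exact Or.inr ⟨hip, hidvd⟩
      · exact Or.inr ⟨pp, pd.trans (Nat.div_dvd_of_dvd hidvd)⟩
    · rintro (hpacc | ⟨pp, pd⟩)
      · exact Or.inl (Or.inl hpacc)
      · rcases (Nat.Prime.dvd_mul pp).mp (hn ▸ pd) with hpi | hpd
        · exact Or.inl (Or.inr ((Nat.prime_dvd_prime_iff_eq pp hip).mp hpi))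
        · exact Or.inr ⟨pp, hpd⟩
  | case2 n i acc h hnd ih =>
    intro h0 h2 hno p
    refine ih h0 (by omega) (fun d hd2 hdi hdd => ?_) p
    rcases Nat.lt_or_ge d i with hlt | hge
    · exact hno d hd2 hlt hdd
    · have hdi : d = i := by omega
      subst hdi
      obtain ⟨c, rfl⟩ := hdd
      exact hnd (Nat.mul_mod_right d c)
  | case3 n i acc h =>
    intro h0 h2 hno p
    by_cases h1 : n = 1
    · subst h1
      rw [if_neg (by simp)]
      constructor
      · exact Or.inl
      · rintro (hpacc | ⟨pp, pd⟩)
        · exact hpacc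
        · exact absurd (Nat.dvd_one.mp pd ▸ pp) Nat.not_prime_one
    · have hgt : pyRoundSqrt n + 1 < i := by
        by_contra hle
        exact h ⟨h2, by omega, h0⟩
      have hp : Nat.Prime n := by
        by_contra hnp
        have hsq := Nat.minFac_sq_le_self h0 hnp
        have hmf2 : 2 ≤ n.minFac := (Nat.minFac_prime h1).two_le
        have hle2 : n.minFac ≤ Nat.sqrt n := Nat.le_sqrt'.mpr hsq
        have := pyRoundSqrt_ge n
        exact hno _ hmf2 (by omega) (Nat.minFac_dvd n)
      rw [if_pos h1]
      simp only [List.mem_append, List.mem_singleton]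
      constructor
      · rintro (hpacc | rfl)
        · exact Or.inl hpacc
        · exact Or.inr ⟨hp, dvd_rfl⟩
      · rintro (hpacc | ⟨pp, pd⟩)
        · exact Or.inl hpacc
        · exact Or.inr ((Nat.prime_dvd_prime_iff_eq pp hp).mp pd)

theorem compress_mem (xs : List Nat) : ∀ prev cnt p : Nat,
    (p ∈ prev :: (compress prev cnt xs).1) ↔ p ∈ prev :: xs := by
  induction xs with
  | nil => intro prev cnt p; simp [compress]
  | cons x xs ih =>
    intro prev cnt p
    rw [compress]
    by_cases hxp : x = prev
    · rw [if_pos hxp]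
      subst hxp
      have := ih x (cnt + 1) p
      simp only [List.mem_cons] at this ⊢
      tauto
    · rw [if_neg hxp]
      have := ih x 1 p
      simp only [List.mem_cons] at this ⊢
      tauto

theorem primeFacto_mem (n : Nat) (h2 : 2 ≤ n) (p : Nat) :
    p ∈ (primeFactoA n).1 ↔ p.Prime ∧ p ∣ n := by
  have hs := factoLoop_spec n 2 [] (by omega) le_rfl (by intro d hd hlt; omega)
  unfold primeFactoA
  cases hf : (if (factoLoop n 2 []).1 ≠ 1 then (factoLoop n 2 []).2 ++ [(factoLoop n 2 []).1]
              else (factoLoop n 2 []).2) with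
  | nil =>
    exfalso
    obtain ⟨q, hq, hqd⟩ := Nat.exists_prime_and_dvd (show n ≠ 1 by omega)
    have := (hs q).mpr (Or.inr ⟨hq, hqd⟩)
    rw [hf] at this
    simp at this
  | cons f0 rest =>
    simp only [hf]
    rw [compress_mem]
    rw [← hf, hs p]
    simp

theorem testA_iff (k : Nat) (h2 : 2 ≤ k) :
    (testA k = true ↔ ∃ p : Nat, p.Prime ∧ p ∣ k ∧
      (PySem.Int.powMod 2 (k / p) ((k : Int) + 1) == 1) = true) := by
  unfold testA
  rw [List.any_eq_true]
  constructor
  · rintro ⟨p, hm, hc⟩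
    obtain ⟨hp, hd⟩ := (primeFacto_mem k h2 p).mp hm
    exact ⟨p, hp, hd, hc⟩
  · rintro ⟨p, hp, hd, hc⟩
    exact ⟨p, (primeFacto_mem k h2 p).mpr ⟨hp, hd⟩, hc⟩

-- ---- bridge: pow(2, e, k+1) == 1  ↔  (2 : ZMod (k+1))^e = 1 ----

theorem powMod_one_iff (k e : Nat) (h2 : 2 ≤ k) :
    ((PySem.Int.powMod 2 e ((k : Int) + 1) == 1) = true) ↔ (2 : ZMod (k + 1)) ^ e = 1 := by
  have hcast : ((k : Int) + 1) = ((k + 1 : Nat) : Int) := by push_cast; ring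
  have hmod : PySem.Int.powMod 2 e ((k : Int) + 1) = ((2 ^ e % (k + 1) : Nat) : Int) := by
    unfold PySem.Int.powMod
    rw [PySem.Int.mod_eq_emod_of_pos (by omega), hcast]
    rw [show ((2 : Int) ^ e) = ((2 ^ e : Nat) : Int) by push_cast; ring]
    norm_cast
  rw [hmod]
  have : NeZero (k + 1) := ⟨by omega⟩
  have h1lt : Fact (1 < k + 1) := ⟨by omega⟩
  constructor
  · intro h
    have hnat : 2 ^ e % (k + 1) = 1 := by
      simp only [beq_iff_eq] at h
      exact_mod_cast h
    have hval : ((2 : ZMod (k + 1)) ^ e).val = 1 := by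
      rw [show (2 : ZMod (k + 1)) ^ e = (((2 ^ e : Nat) : ZMod (k + 1))) by push_cast; ring]
      rw [ZMod.val_natCast]
      exact hnat
    have := ZMod.val_one (k + 1)
    exact ZMod.val_injective _ (by rw [hval, this])
  · intro h
    have hval : ((2 : ZMod (k + 1)) ^ e).val = 1 := by rw [h]; exact ZMod.val_one (k + 1)
    rw [show (2 : ZMod (k + 1)) ^ e = (((2 ^ e : Nat) : ZMod (k + 1))) by push_cast; ring,
      ZMod.val_natCast] at hval
    simp only [beq_iff_eq]
    exact_mod_cast hval

-- ---- B's factoring pass characterised ----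

theorem stripFac_spec (n q : Nat) :
    0 < n → 2 ≤ q → Nat.Prime q →
      (stripFac n q ∣ n ∧ ¬ q ∣ stripFac n q ∧ 0 < stripFac n q ∧
        ∀ p : Nat, p.Prime → p ∣ n → p ≠ q → p ∣ stripFac n q) := by
  fun_induction stripFac with
  | case1 n h ih =>
    intro h0 hq2 hqp
    have hdvd : q ∣ n := Nat.dvd_of_mod_eq_zero h.2.2
    obtain ⟨ih1, ih2, ih3, ih4⟩ :=
      ih (Nat.div_pos (Nat.le_of_dvd h0 hdvd) (by omega)) hq2 hqp
    refine ⟨ih1.trans (Nat.div_dvd_of_dvd hdvd), ih2, ih3, ?_⟩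
    intro p pp pd pne
    refine ih4 p pp ?_ pne
    have hn : q * (n / q) = n := Nat.mul_div_cancel' hdvd
    rcases (Nat.Prime.dvd_mul pp).mp (hn ▸ pd) with hq' | hnd
    · exact absurd ((Nat.prime_dvd_prime_iff_eq pp hqp).mp hq') pne
    · exact hnd
  | case2 n h =>
    intro h0 hq2 _
    have hnd : ¬ q ∣ n := by
      intro hdd
      obtain ⟨c, rfl⟩ := hdd
      exact h ⟨hq2, h0, Nat.mul_mod_right q c⟩
    exact ⟨dvd_rfl, hnd, h0, fun p pp pd pne => pd⟩

theorem lucasFacLoop_iff (k n q : Nat) :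
    0 < n → 2 ≤ q → (∀ d, 2 ≤ d → d < q → ¬ d ∣ n) →
      (lucasFacLoop k n q = true ↔ ∀ p : Nat, p.Prime → p ∣ n →
        ¬ ((PySem.Int.powMod 2 (k / p) ((k : Int) + 1) == 1) = true)) := by
  fun_induction lucasFacLoop with
  | case1 n q h hd hC =>
    intro h0 h2 hno
    simp only [Bool.false_eq_true, false_iff]
    intro hall
    have hqdvd : q ∣ n := Nat.dvd_of_mod_eq_zero hd
    exact hall q (prime_of_min_dvd n q h.1 hqdvd hno) hqdvd hC
  | case2 n q h hd hC ih =>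
    intro h0 h2 hno
    have hqdvd : q ∣ n := Nat.dvd_of_mod_eq_zero hd
    have hqp : Nat.Prime q := prime_of_min_dvd n q h.1 hqdvd hno
    obtain ⟨s1, s2, s3, s4⟩ := stripFac_spec n q h0 h.1 hqp
    rw [ih s3 (by omega) (fun d hd2 hdq hdd => by
      rcases Nat.lt_or_ge d q with hlt | hge
      · exact hno d hd2 hlt (hdd.trans s1)
      · have : d = q := by omega
        subst this
        exact s2 hdd)]
    constructor
    · intro hall p pp pd
      by_cases hpq : p = q
      · subst hpq
        exact fun hc => hC hc
      · exact hall p pp (s4 p pp pd hpq)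
    · intro hall p pp pd
      exact hall p pp (pd.trans s1)
  | case3 n q h hnd ih =>
    intro h0 h2 hno
    refine ih h0 (by omega) (fun d hd2 hdq hdd => ?_)
    rcases Nat.lt_or_ge d q with hlt | hge
    · exact hno d hd2 hlt hdd
    · have : d = q := by omega
      subst this
      obtain ⟨c, rfl⟩ := hdd
      exact hnd (Nat.mul_mod_right d c)
  | case4 n q h =>
    intro h0 h2 hno
    by_cases hn1 : n = 1
    · subst hn1
      simp only [beq_self_eq_true, Bool.true_or, true_iff]
      intro p pp pd
      exact absurd (Nat.dvd_one.mp pd ▸ pp) Nat.not_prime_one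
    · have hnlt : n < q * q := by
        by_contra hge
        exact h ⟨h2, by omega⟩
      have hp : Nat.Prime n := by
        by_contra hnp
        have hsq := Nat.minFac_sq_le_self h0 hnp
        rw [pow_two] at hsq
        have hmf2 : 2 ≤ n.minFac := (Nat.minFac_prime hn1).two_le
        have hmlt : n.minFac < q := by
          by_contra hge
          push Not at hge
          have : q * q ≤ n.minFac * n.minFac := Nat.mul_le_mul hge hge
          nlinarith
        exact hno _ hmf2 hmlt (Nat.minFac_dvd n)
      have hne : (n == 1) = false := by simp [hn1]
      rw [hne, Bool.false_or]
      rcases hX : (PySem.Int.powMod 2 (k / n) ((k : Int) + 1) == 1) with _ | _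
      · simp only [Bool.not_false, true_iff]
        intro p pp pd
        have : p = n := (Nat.prime_dvd_prime_iff_eq pp hp).mp pd
        subst this
        rw [hX]
        simp
      · simp only [Bool.not_true, Bool.false_eq_true, false_iff]
        intro hall
        exact hall n hp dvd_rfl hX

-- ---- the Lucas certificate ↔ A's two-phase test, per candidate ----

theorem lucasTwo_iff (k : Nat) (h2 : 2 ≤ k) (he : k % 2 = 0) :
    lucasTwo k = true ↔ (isPrimeA (k + 1) = true ∧ testA k = false) := by
  have hfac := lucasFacLoop_iff k k 2 (by omega) le_rfl (by intro d hd hlt; omega)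
  constructor
  · intro hl
    unfold lucasTwo at hl
    by_cases hF : (PySem.Int.powMod 2 k ((k : Int) + 1) == 1) = true
    · rw [if_pos hF] at hl
      -- Lucas primality: the certificate proves k+1 prime
      have hferm : (2 : ZMod (k + 1)) ^ (k + 1 - 1) = 1 := by
        rw [show k + 1 - 1 = k by omega]
        exact (powMod_one_iff k k h2).mp hF
      have hprim : ∀ q : Nat, q.Prime → q ∣ (k + 1 - 1) →
          (2 : ZMod (k + 1)) ^ ((k + 1 - 1) / q) ≠ 1 := by
        intro q hq hqd h1
        rw [show k + 1 - 1 = k by omega] at hqd h1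
        exact (hfac.mp hl) q hq hqd ((powMod_one_iff k (k / q) h2).mpr h1)
      have hp : Nat.Prime (k + 1) := lucas_primality (k + 1) 2 hferm hprim
      refine ⟨(isPrimeA_iff (k + 1) (by omega)).mpr hp, ?_⟩
      rcases hT : testA k with _ | _
      · rfl
      · obtain ⟨p, pp, pd, pc⟩ := (testA_iff k h2).mp hT
        exact absurd pc ((hfac.mp hl) p pp pd)
    · rw [if_neg hF] at hl
      exact Bool.noConfusion hl
  · rintro ⟨hpr, hT⟩
    have hp : Nat.Prime (k + 1) := (isPrimeA_iff (k + 1) (by omega)).mp hpr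
    have : Fact (Nat.Prime (k + 1)) := ⟨hp⟩
    -- Fermat: 2^(p-1) = 1 since 2 ≠ 0 in ZMod p (p = k+1 is odd, k even ≥ 2)
    have h2ne : (2 : ZMod (k + 1)) ≠ 0 := by
      intro hz
      have : NeZero (k + 1) := ⟨by omega⟩
      have hval : ((2 : ZMod (k + 1))).val = 0 := by rw [hz, ZMod.val_zero]
      rw [show (2 : ZMod (k + 1)) = (((2 : Nat) : ZMod (k + 1))) by push_cast; ring,
        ZMod.val_natCast] at hval
      have hdvd : (k + 1) ∣ 2 := Nat.dvd_of_mod_eq_zero hval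
      have := Nat.le_of_dvd (by omega) hdvd
      omega
    have hferm : (2 : ZMod (k + 1)) ^ k = 1 := by
      have := ZMod.pow_card_sub_one_eq_one h2ne
      rwa [show k + 1 - 1 = k by omega] at this
    unfold lucasTwo
    rw [if_pos ((powMod_one_iff k k h2).mpr hferm)]
    apply hfac.mpr
    intro p pp pd pc
    exact absurd ((testA_iff k h2).mpr ⟨p, pp, pd, pc⟩) (by rw [hT]; simp)

-- ---- the two search loops visit the same candidates ----

theorem sqrt_eq_of (n s : Nat) (h1 : s * s ≤ n) (h2 : n < (s + 1) * (s + 1)) :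
    Nat.sqrt n = s := by
  have ha : s ≤ Nat.sqrt n := Nat.le_sqrt.mpr h1
  have hb : Nat.sqrt n < s + 1 := Nat.sqrt_lt'.mpr (by nlinarith)
  omega

theorem isPrimeA_three : isPrimeA 3 = true := by
  have h3 : Nat.sqrt 3 = 1 := sqrt_eq_of 3 1 (by norm_num) (by norm_num)
  unfold isPrimeA pyRoundSqrt
  rw [h3]
  decide

theorem innerA_inv (k : Nat) : k % 2 = 0 → 2 ≤ k → (innerA k) % 2 = 0 ∧ 2 ≤ innerA k := by
  fun_induction innerA with
  | case1 k h => exact fun a b => ⟨a, b⟩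
  | case2 k h ih =>
    intro he hk
    have hk2 : k ≠ 2 := by rintro rfl; exact h isPrimeA_three
    exact ih (by omega) (by omega)

theorem innerA_prime (k : Nat) : isPrimeA (innerA k + 1) = true := by
  fun_induction innerA with
  | case1 k h => exact h
  | case2 k h ih => exact ih

-- B steps through the non-prime candidates A's inner loop skips, failing the Fermat check
theorem outerB_skip (k : Nat) : k % 2 = 0 → 2 ≤ k → outerB k = outerB (innerA k) := by
  fun_induction innerA with
  | case1 k h => intro _ _; rfl
  | case2 k h ih =>
    intro he hk
    have hk2 : k ≠ 2 := by rintro rfl; exact h isPrimeA_three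
    have hl : lucasTwo k = false := by
      rcases hl' : lucasTwo k with _ | _
      · rfl
      · exact absurd ((lucasTwo_iff k hk he).mp hl').1 h
    rw [outerB, hl]
    simp only [Bool.false_eq_true, if_false]
    rw [dif_pos hk]
    exact ih (by omega) (by omega)

theorem testA_two : testA 2 = false := by
  have h2 : Nat.sqrt 2 = 1 := sqrt_eq_of 2 1 (by norm_num) (by norm_num)
  have h1 : Nat.sqrt 1 = 1 := sqrt_eq_of 1 1 (by norm_num) (by norm_num)
  rw [testA, primeFactoA, factoLoop]
  simp only [pyRoundSqrt, h2]
  norm_num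
  rw [factoLoop]
  simp only [pyRoundSqrt, h1]
  norm_num
  rw [factoLoop]
  simp only [pyRoundSqrt, h1]
  norm_num [compress]
  decide

theorem outer_eq (k : Nat) : k % 2 = 0 → 2 ≤ k → outerA k = outerB k := by
  induction k using Nat.strong_induction_on with
  | _ k ih =>
    intro he hk
    rw [outerA, outerB_skip k he hk]
    have hinv := innerA_inv k he hk
    have hle := innerA_le k
    have hprA := innerA_prime k
    by_cases hT : testA (innerA k) = true
    · have hne2 : innerA k ≠ 2 := by
        rintro h2e
        rw [h2e, testA_two] at hT
        exact Bool.noConfusion hT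
      have hl : lucasTwo (innerA k) = false := by
        rcases hl' : lucasTwo (innerA k) with _ | _
        · rfl
        · have := ((lucasTwo_iff (innerA k) hinv.2 hinv.1).mp hl').2
          rw [hT] at this
          exact Bool.noConfusion this
      rw [dif_pos hT, outerB, hl]
      simp only [Bool.false_eq_true, if_false]
      rw [dif_pos hinv.2]
      exact ih (innerA k - 2) (by omega) (by omega) (by omega)
    · have hl : lucasTwo (innerA k) = true :=
        (lucasTwo_iff (innerA k) hinv.2 hinv.1).mpr ⟨hprA, by
          rcases hT' : testA (innerA k) with _ | _
          · rfl
          · exact absurd hT' hT⟩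
      rw [dif_neg hT, outerB, hl]
      simp

-- ===== VERDICT (by name: the statement is the Claim_ definition above) =====
theorem na_set_spec : Claim_equal_na_set := by
  intro k _ pre
  unfold Pre_na_set at pre
  unfold Spec_na_set na_set na_set_alt
  have hm : PySem.Int.mod k 2 = k % 2 := PySem.Int.mod_eq_emod_of_pos (by omega)
  set k0 := if PySem.Int.mod k 2 ≠ 0 then k - 1 else k with hk0
  have h2 : 2 ≤ k0.toNat ∧ k0.toNat % 2 = 0 := by
    rw [hk0, hm]
    split <;> rename_i hsp <;> [skip; skip] <;> omega
  exact congrArg (fun n : Nat => (n : Int)) (outer_eq k0.toNat h2.2 h2.1)
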